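-- pv_equiv track=rewrite | github.com/feihoo87/waveforms | waveforms/qlisp/simulator/simple.py | splite_at
-- ===== SOURCE A (Python) =====
-- def splite_at(l, bits):
--     """将 l 的二进制位于 bits 所列的位置上断开插上0
--
--     如 splite_at(int('1111',2), [0,2,4,6]) == int('10101010', 2)
--     bits 必须从小到大排列
--     """
--     r = l
--     for n in bits:
--         mask = (1 << n) - 1
--         low = r & mask
--         high = r - low
--         r = (high << 1) + low
--     return r
-- ===== SOURCE B (Python) =====
-- def splite_at(l, bits):
--     """将 l 的二进制位于 bits 所列的位置上断开插上0
--
--     如 splite_at(int('1111',2), [0,2,4,6]) == int('10101010', 2)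
--     bits 必须从小到大排列
--     """
--     # cuts[j] is the bit of l at which the j-th lowest zero is inserted (cut
--     # positions counted in l itself, kept sorted ascending).  That zero
--     # currently occupies bit cuts[j] + j of the number under construction, so a
--     # request to insert a zero at bit n cuts l at n minus the number of zeros
--     # sitting below bit n, i.e. at n - below.
--     cuts = []
--     for n in bits:
--         below = 0
--         while below < len(cuts) and cuts[below] + below < n:
--             below += 1
--         cuts.insert(below, n - below)
--     # assemble the result in one pass, lowest cut first: mask one segment of l
--     # out per cut and place it at its final position; the remaining high part h
--     # (a signed number) carries the sign bits of a negative l.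
--     acc = 0      # finished low segments, already at their final positions
--     shift = 0    # final position where the next segment starts
--     prev = 0     # bit of l where the next segment starts
--     h = l        # remaining high part of l
--     for c in cuts:
--         w = c - prev
--         acc += (h & ((1 << w) - 1)) << shift
--         h >>= w
--         shift += w + 1
--         prev = c
--     return acc + (h << shift)
-- ===== Notes on version B (the rewrite author's own statement) =====
-- stated objective: alternative
-- what changed: Instead of A's loop that re-splits and re-shifts the whole running number once per position, B first locates each requested position's cut in l itself (a zero inserted for cut d_j sits at bit d_j + j, so a request at bit n cuts l at n minus the number of zeros below n) and then assembles the result in a single pass, masking one segment of l out per cut and placing it at its final position, with the open-ended high part carrying the sign bits of a negative l.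
import Mathlib
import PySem

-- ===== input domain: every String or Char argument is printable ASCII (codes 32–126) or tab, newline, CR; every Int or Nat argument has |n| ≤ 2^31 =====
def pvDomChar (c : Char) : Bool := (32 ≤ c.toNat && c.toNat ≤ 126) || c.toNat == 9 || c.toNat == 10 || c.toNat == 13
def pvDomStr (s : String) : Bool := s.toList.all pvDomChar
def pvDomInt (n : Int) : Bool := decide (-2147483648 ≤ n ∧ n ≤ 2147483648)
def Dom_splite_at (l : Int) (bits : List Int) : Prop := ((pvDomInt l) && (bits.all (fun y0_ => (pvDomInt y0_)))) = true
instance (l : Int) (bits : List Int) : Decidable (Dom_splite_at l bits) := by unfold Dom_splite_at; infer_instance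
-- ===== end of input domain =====

-- B re-implements the zero-bit insertion in two phases — locate every requested position's
-- cut in l itself (counting the zeros already sitting below it), then assemble the result
-- segment by segment in one pass — instead of A's re-shifting of the whole running number
-- at every step.


-- ===== PORT A =====
-- literal port of A's loop: r = l; for n in bits: split r at bit n, shift the high part up by one.
def splite_at (l : Int) (bits : List Int) : Int :=
  bits.foldl (fun r n =>
    let mask := (1 <<< n.toNat) - 1      -- (1 << n) - 1; exact for 0 ≤ n (Python raises on n < 0, outside Pre_)
    let low := PySem.Int.band r mask     -- r & mask
    let high := r - low
    (high <<< (1 : Nat)) + low) l        -- (high << 1) + low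

-- ===== PORT B =====
-- port of Source B's inner while+insert: walk cuts from the low end while cuts[below] + below < n,
-- then insert n - below at that index (the walk and the insertion fused into one recursion).
def pvIns2 (cuts : List Int) (j n : Int) : List Int :=
  match cuts with
  | [] => [n - j]
  | d :: ds => if d + j < n then d :: pvIns2 ds (j + 1) n else (n - j) :: d :: ds

-- port of Source B: phase 1 builds the sorted cut positions (the for-loop is the fold, the
-- while+insert is pvIns2); phase 2 is the assembly pass — a fold over the cuts with state
-- st = (acc, shift, prev, h): mask the next segment of l out of the remaining part h and
-- place it at its final position.  shift is a Nat: under Pre_ every Python shift count is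
-- ≥ 0 (exact there; Python raises on a negative count, outside Pre_).
def splite_at_alt (l : Int) (bits : List Int) : Int :=
  let cuts := bits.foldl (fun cuts n => pvIns2 cuts 0 n) []
  let st := cuts.foldl (fun (st : Int × Nat × Int × Int) c =>
    let w := c - st.2.2.1
    (st.1 + (PySem.Int.band st.2.2.2 ((1 <<< w.toNat) - 1)) <<< st.2.1,
     st.2.1 + (w.toNat + 1),
     c,
     st.2.2.2 >>> w.toNat)) (0, 0, 0, l)   -- acc += (h & ((1<<w)-1)) << shift; shift += w+1; prev = c; h >>= w
  st.1 + (st.2.2.2 <<< st.2.1)             -- acc + (h << shift)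

-- ===== PRECONDITION & SPEC =====
-- Pre_ excludes exactly the lists with a negative entry, on which A raises ValueError
-- (negative shift count).
def Pre_splite_at (l : Int) (bits : List Int) : Prop := ∀ b ∈ bits, 0 ≤ b
instance (l : Int) (bits : List Int) : Decidable (Pre_splite_at l bits) := by unfold Pre_splite_at; infer_instance

def pvWitness_splite_at : Int × List Int := (15, [0, 2, 4, 6])

def Spec_splite_at (l : Int) (bits : List Int) (out : Int) : Prop := out = splite_at_alt l bits
instance (l : Int) (bits : List Int) (out : Int) : Decidable (Spec_splite_at l bits out) := by unfold Spec_splite_at; infer_instance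

-- ===== CLAIM (what is proved, stated in full; the proofs are below) =====
def Claim_equal_splite_at : Prop := ∀ (l : Int) (bits : List Int), Dom_splite_at l bits → Pre_splite_at l bits → Spec_splite_at l bits (splite_at l bits)

-- ===== LEMMAS AND PROOFS =====

theorem pv_band_mask (a : Int) (k : Nat) : PySem.Int.band a (((1 <<< k) - 1 : Nat) : Int) = a % 2 ^ k := by
  have h2 : (0:Int) < 2 ^ k := by positivity
  have hsh : (((1 <<< k - 1 : Nat) : Int)) = (2 : Int) ^ k - 1 := by
    rw [Nat.one_shiftLeft, Nat.cast_sub (Nat.one_le_two_pow)]; push_cast; ring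
  have hcast : ((2:Int) ^ k) = ((2 ^ k : Nat) : Int) := by push_cast; ring
  have htn : ((2:Int) ^ k - 1).toNat = 2 ^ k - 1 := by omega
  rw [hsh]
  unfold PySem.Int.band
  by_cases ha : 0 ≤ a
  · rw [if_pos ha, if_pos (by omega)]
    rw [htn, Nat.and_two_pow_sub_one_eq_mod]
    have : a = (a.toNat : Int) := by omega
    rw [this, hcast]
    push_cast
    rfl
  · rw [if_neg ha, if_pos (by omega)]
    rw [htn, Nat.and_comm, Nat.and_two_pow_sub_one_eq_mod]
    set m : Nat := (-a - 1).toNat with hm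
    set s : Nat := m % 2 ^ k with hs
    have hslt : s < 2 ^ k := Nat.mod_lt _ (by positivity)
    have ham : a = -(m : Int) - 1 := by omega
    obtain ⟨q, hq⟩ : ∃ q : Nat, m = q * 2 ^ k + s :=
      ⟨m / 2 ^ k, by rw [hs, Nat.mul_comm]; exact (Nat.div_add_mod m (2 ^ k)).symm⟩
    have key : a = ((2:Int) ^ k - 1 - s) + 2 ^ k * (-(q : Int) - 1) := by
      rw [ham, hq]; push_cast; ring
    have : a % 2 ^ k = ((2:Int) ^ k - 1 - s) % 2 ^ k := by
      conv_lhs => rw [key]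
      rw [Int.add_mul_emod_self_left]
    rw [this, Int.emod_eq_of_lt (by omega) (by omega)]
    omega

theorem pv_band_mask' (a : Int) (k : Nat) : PySem.Int.band a (((1 <<< k : Nat) : Int) - 1) = a % 2 ^ k := by
  have h : (((1 <<< k : Nat) : Int) - (1 : Int)) = (((1 <<< k) - 1 : Nat) : Int) := by
    have h1 := Nat.one_le_two_pow (n := k)
    simp only [Nat.one_shiftLeft]
    omega
  rw [h, pv_band_mask]

theorem pv_emod_split (H low : Int) (t n : Nat) (ht : t ≤ n) (h0 : 0 ≤ low) (h1 : low < 2 ^ t) :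
    (H * 2 ^ t + low) % 2 ^ n = (H % 2 ^ (n - t)) * 2 ^ t + low := by
  set m : Nat := n - t with hm
  have hpow : (2:Int) ^ n = 2 ^ m * 2 ^ t := by rw [← pow_add]; congr 1; omega
  have h2m : (0:Int) < 2 ^ m := by positivity
  have h2t : (0:Int) < 2 ^ t := by positivity
  have hed := Int.mul_ediv_add_emod H (2 ^ m)
  have hnn : 0 ≤ H % 2 ^ m := Int.emod_nonneg H (by positivity)
  have hlt : H % 2 ^ m < 2 ^ m := Int.emod_lt_of_pos H h2m
  have key : H * 2 ^ t + low = ((H % 2 ^ m) * 2 ^ t + low) + 2 ^ n * (H / 2 ^ m) := by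
    rw [hpow]; nlinarith [hed]
  rw [key, Int.add_mul_emod_self_left, Int.emod_eq_of_lt (by positivity) (by nlinarith)]

-- l mod 2^c splits at any lower position t
theorem pv_mod_decomp (l : Int) (t c : Nat) (ht : t ≤ c) :
    l % 2 ^ c = ((l / 2 ^ t) % 2 ^ (c - t)) * 2 ^ t + l % 2 ^ t := by
  have h2t : (0:Int) < 2 ^ t := by positivity
  have hed := Int.mul_ediv_add_emod l (2 ^ t)
  have h0 : 0 ≤ l % 2 ^ t := Int.emod_nonneg l (by positivity)
  have h1 : l % 2 ^ t < 2 ^ t := Int.emod_lt_of_pos l h2t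
  calc l % 2 ^ c = ((l / 2 ^ t) * 2 ^ t + l % 2 ^ t) % 2 ^ c := by rw [show (l / 2 ^ t) * 2 ^ t + l % 2 ^ t = l by linarith]
    _ = ((l / 2 ^ t) % 2 ^ (c - t)) * 2 ^ t + l % 2 ^ t := pv_emod_split _ _ t c ht h0 h1

theorem pv_A_cons (r n : Int) (ns : List Int) :
    splite_at r (n :: ns) = splite_at ((r - r % 2 ^ n.toNat) * 2 + r % 2 ^ n.toNat) ns := by
  simp only [splite_at, List.foldl_cons]
  congr 1
  rw [pv_band_mask, Int.shiftLeft_eq]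
  ring

theorem pv_A_single (r n : Int) :
    splite_at r [n] = (r - r % 2 ^ n.toNat) * 2 + r % 2 ^ n.toNat := by
  rw [pv_A_cons]; rfl

theorem pv_shift_lemma (ns : List Int) (H low : Int) (t : Nat)
    (hns : ∀ n ∈ ns, (t : Int) ≤ n) (h0 : 0 ≤ low) (h1 : low < 2 ^ t) :
    splite_at (H * 2 ^ t + low) ns = splite_at H (ns.map fun n => n - (t : Int)) * 2 ^ t + low := by
  induction ns generalizing H with
  | nil => simp [splite_at]
  | cons n ns ih =>
    have htn : t ≤ n.toNat := by have := hns n (by simp); omega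
    have hmt : (n - (t : Int)).toNat = n.toNat - t := by have := hns n (by simp); omega
    rw [List.map_cons, pv_A_cons, pv_A_cons]
    rw [pv_emod_split H low t n.toNat htn h0 h1]
    have key : (H * 2 ^ t + low - (H % 2 ^ (n.toNat - t) * 2 ^ t + low)) * 2 +
        (H % 2 ^ (n.toNat - t) * 2 ^ t + low) =
        ((H - H % 2 ^ (n - (t:Int)).toNat) * 2 + H % 2 ^ (n - (t:Int)).toNat) * 2 ^ t + low := by
      rw [hmt]; ring
    rw [key, ih _ (fun x hx => hns x (by simp [hx]))]

-- the insertion scan A's sequential behaviour reduces to: place the rebased position among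
-- the existing cut positions (proof-side device only; describes A, not either port)
def pvInsCut (cuts : List Int) (n : Int) : List Int :=
  match cuts with
  | [] => [n]
  | t :: ts => if t ≤ n - 1 then t :: pvInsCut ts (n - 1) else n :: t :: ts

-- the reassembly function: strip the segment below the lowest cut, recurse on the rest rebased
def pvR (h : Int) (cuts : List Int) : Int :=
  match cuts with
  | [] => h
  | c :: cs => pvR (h / 2 ^ c.toNat) (cs.map fun x => x - c) * 2 ^ (c.toNat + 1) + h % 2 ^ c.toNat
termination_by cuts.length
decreasing_by simp

-- every element of the inserted list is at least any common lower bound of cuts and n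
theorem pv_ins_lb (cuts : List Int) (n a : Int) (hc : ∀ c ∈ cuts, a ≤ c) (hn : a ≤ n) :
    ∀ c ∈ pvInsCut cuts n, a ≤ c := by
  induction cuts generalizing n with
  | nil => simpa [pvInsCut] using hn
  | cons t ts ih =>
    intro c hmem
    by_cases hcase : t ≤ n - 1
    · rw [show pvInsCut (t :: ts) n = t :: pvInsCut ts (n - 1) by rw [pvInsCut, if_pos hcase]] at hmem
      rcases List.mem_cons.mp hmem with h | h
      · exact h ▸ hc t (by simp)
      · exact ih (n - 1) (fun x hx => hc x (by simp [hx])) (by have := hc t (by simp); omega) c h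
    · rw [show pvInsCut (t :: ts) n = n :: t :: ts by rw [pvInsCut, if_neg hcase]] at hmem
      rcases List.mem_cons.mp hmem with h | h
      · omega
      · exact hc c h

theorem pv_ins_pairwise (cuts : List Int) (n : Int) (hc : List.Pairwise (· ≤ ·) cuts) :
    List.Pairwise (· ≤ ·) (pvInsCut cuts n) := by
  induction cuts generalizing n with
  | nil => simp [pvInsCut]
  | cons t ts ih =>
    by_cases hcase : t ≤ n - 1
    · rw [show pvInsCut (t :: ts) n = t :: pvInsCut ts (n - 1) by rw [pvInsCut, if_pos hcase]]
      refine List.pairwise_cons.mpr ⟨?_, ih (n - 1) (List.pairwise_cons.mp hc).2⟩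
      exact pv_ins_lb ts (n - 1) t (fun x hx => List.rel_of_pairwise_cons hc hx) (by omega)
    · rw [show pvInsCut (t :: ts) n = n :: t :: ts by rw [pvInsCut, if_neg hcase]]
      refine List.pairwise_cons.mpr ⟨?_, hc⟩
      intro x hx
      rcases List.mem_cons.mp hx with h | h
      · omega
      · have := List.rel_of_pairwise_cons hc h; omega

-- insertion commutes with a uniform shift of the coordinates
theorem pv_ins_map_sub (cuts : List Int) (n d : Int) :
    (pvInsCut cuts n).map (fun x => x - d) = pvInsCut (cuts.map fun x => x - d) (n - d) := by
  induction cuts generalizing n with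
  | nil => simp [pvInsCut]
  | cons t ts ih =>
    by_cases hcase : t ≤ n - 1
    · rw [show pvInsCut (t :: ts) n = t :: pvInsCut ts (n - 1) by rw [pvInsCut, if_pos hcase],
        List.map_cons,
        show pvInsCut ((t :: ts).map fun x => x - d) (n - d)
          = (t - d) :: pvInsCut (ts.map fun x => x - d) (n - d - 1) by
            rw [List.map_cons, pvInsCut, if_pos (by omega)]]
      rw [ih (n - 1), show n - 1 - d = n - d - 1 from by ring]
    · rw [show pvInsCut (t :: ts) n = n :: t :: ts by rw [pvInsCut, if_neg hcase],
        show pvInsCut ((t :: ts).map fun x => x - d) (n - d) = (n - d) :: (t :: ts).map (fun x => x - d) by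
          rw [List.map_cons, pvInsCut, if_neg (by omega)]]
      simp

theorem pvR_nil (h : Int) : pvR h [] = h := by rw [pvR]

theorem pvR_cons (h c : Int) (cs : List Int) :
    pvR h (c :: cs) = pvR (h / 2 ^ c.toNat) (cs.map fun x => x - c) * 2 ^ (c.toNat + 1) + h % 2 ^ c.toNat := by
  rw [pvR]

theorem pv_step_eq (l : Int) (N : Nat) :
    (l - l % 2 ^ N) * 2 + l % 2 ^ N = (l / 2 ^ N) * 2 ^ (N + 1) + l % 2 ^ N := by
  have h := Int.mul_ediv_add_emod l (2 ^ N)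
  rw [pow_succ]; nlinarith [h]

theorem pv_map_sub_pairwise (c : Int) (cs : List Int) (hp : List.Pairwise (· ≤ ·) cs) :
    List.Pairwise (· ≤ ·) (cs.map fun x => x - c) :=
  List.pairwise_map.mpr (hp.imp (fun h => by omega))

theorem pv_step_R (k : Nat) (cuts : List Int) (hk : cuts.length = k) (l n : Int)
    (hp : List.Pairwise (· ≤ ·) cuts) (hnn : ∀ c ∈ cuts, 0 ≤ c) (hn : 0 ≤ n) :
    splite_at (pvR l cuts) [n] = pvR l (pvInsCut cuts n) := by
  induction k generalizing cuts l n with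
  | zero =>
    match cuts, hk with
    | [], _ =>
      rw [pvR_nil, pv_A_single, pv_step_eq, show pvInsCut [] n = [n] from rfl,
        pvR_cons, List.map_nil, pvR_nil]
  | succ k ih =>
    match cuts, hk with
    | c :: cs, hk =>
      have hlen : cs.length = k := by simpa using hk
      have hc0 : (0:Int) ≤ c := hnn c (by simp)
      have hCc : ((c.toNat : Int)) = c := by omega
      have h2C : (0:Int) < 2 ^ c.toNat := by positivity
      have hlow0 : 0 ≤ l % 2 ^ c.toNat := Int.emod_nonneg l (by positivity)
      have hlow1 : l % 2 ^ c.toNat < 2 ^ (c.toNat + 1) := by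
        have h1 := Int.emod_lt_of_pos l h2C
        have h2 : (2:Int) ^ (c.toNat + 1) = 2 ^ c.toNat * 2 := by rw [pow_succ]
        nlinarith
      by_cases hcase : c ≤ n - 1
      · rw [show pvInsCut (c :: cs) n = c :: pvInsCut cs (n - 1) from by rw [pvInsCut, if_pos hcase]]
        rw [pvR_cons, pvR_cons l c, pv_ins_map_sub]
        rw [pv_shift_lemma [n] _ _ (c.toNat + 1) (by intro x hx; simp at hx; omega) hlow0 hlow1]
        rw [List.map_cons, List.map_nil]
        rw [show n - ((c.toNat + 1 : Nat) : Int) = n - 1 - c from by push_cast [hCc]; ring]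
        rw [ih (cs.map fun x => x - c) (by simpa using hlen) (l / 2 ^ c.toNat) (n - 1 - c)
          (pv_map_sub_pairwise c cs (List.pairwise_cons.mp hp).2)
          (fun x hx => by
            obtain ⟨y, hy, rfl⟩ := List.mem_map.mp hx
            have := List.rel_of_pairwise_cons hp hy; omega)
          (by omega)]
      · have hnc : n ≤ c := by omega
        have hNn : ((n.toNat : Int)) = n := by omega
        have hNC : n.toNat ≤ c.toNat := by omega
        have hsub : (c - n).toNat = c.toNat - n.toNat := by omega
        set Q : Int := (l / 2 ^ n.toNat) % 2 ^ (c.toNat - n.toNat) with hQdef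
        set L : Int := l % 2 ^ n.toNat with hLdef
        set Hc : Int := pvR (l / 2 ^ c.toNat) (cs.map fun x => x - c) with hHc
        have hQl := pv_mod_decomp l n.toNat c.toNat hNC
        have h2N : (0:Int) < 2 ^ n.toNat := by positivity
        have hL0 : 0 ≤ L := Int.emod_nonneg l (by positivity)
        have hL1 : L < 2 ^ n.toNat := Int.emod_lt_of_pos l h2N
        have hQ0 : 0 ≤ Q := Int.emod_nonneg _ (by positivity)
        have hrhs : pvR l (n :: c :: cs) = (Hc * 2 ^ (c.toNat - n.toNat + 1) + Q) * 2 ^ (n.toNat + 1) + L := by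
          rw [pvR_cons, List.map_cons, pvR_cons]
          rw [Int.ediv_ediv_of_nonneg (by positivity), ← pow_add,
            show n.toNat + (c - n).toNat = c.toNat from by omega]
          rw [List.map_map,
            show ((fun x => x - (c - n)) ∘ fun x => x - n) = fun x => x - c from funext (fun x => by simp only [Function.comp_apply]; ring),
            hsub]
        have hpowC1 : (2:Int) ^ (c.toNat + 1) = 2 ^ (c.toNat - n.toNat) * 2 ^ n.toNat * 2 := by
          rw [← pow_add, ← pow_succ]
          congr 1
          omega
        have hr : pvR l (c :: cs) = L + 2 ^ n.toNat * (Hc * (2 ^ (c.toNat - n.toNat) * 2) + Q) := by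
          rw [pvR_cons, ← hHc, hQl, ← hQdef, ← hLdef, hpowC1]
          ring
        have hrmod : pvR l (c :: cs) % 2 ^ n.toNat = L := by
          rw [hr, Int.add_mul_emod_self_left, Int.emod_eq_of_lt hL0 hL1]
        rw [show pvInsCut (c :: cs) n = n :: c :: cs from by rw [pvInsCut, if_neg hcase]]
        rw [pv_A_single, hrmod, hr, hrhs]
        have hpowN1 : (2:Int) ^ (n.toNat + 1) = 2 ^ n.toNat * 2 := by rw [pow_succ]
        have hpow2 : (2:Int) ^ (c.toNat - n.toNat + 1) = 2 ^ (c.toNat - n.toNat) * 2 := by rw [pow_succ]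
        rw [hpow2, hpowN1]
        ring

theorem pv_A_R (bits : List Int) : ∀ (cuts : List Int) (l : Int),
    List.Pairwise (· ≤ ·) cuts → (∀ c ∈ cuts, 0 ≤ c) → (∀ b ∈ bits, 0 ≤ b) →
    splite_at (pvR l cuts) bits = pvR l (bits.foldl (fun cuts n => pvInsCut cuts n) cuts) := by
  induction bits with
  | nil => intro cuts l _ _ _; simp [splite_at]
  | cons n bits ih =>
    intro cuts l hp hnn hb
    have hn0 : (0:Int) ≤ n := hb n (by simp)
    have hstep : splite_at (pvR l cuts) (n :: bits)
        = splite_at (pvR l (pvInsCut cuts n)) bits := by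
      rw [pv_A_cons, ← pv_step_R cuts.length cuts rfl l n hp hnn hn0, pv_A_single]
    rw [hstep, List.foldl_cons]
    exact ih (pvInsCut cuts n) l (pv_ins_pairwise cuts n hp)
      (pv_ins_lb cuts n 0 hnn hn0) (fun b hbb => hb b (by simp [hbb]))

theorem pv_A_eq (l : Int) (bits : List Int) (hb : ∀ b ∈ bits, 0 ≤ b) :
    splite_at l bits = pvR l (bits.foldl (fun cuts n => pvInsCut cuts n) []) := by
  have := pv_A_R bits [] l (by simp) (by simp) hb
  rwa [pvR_nil] at this

-- Source B's scan viewed with the probe position rebased instead of the walk index carried: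
-- pvIns2 cuts j n walks with condition cuts[k] + (j+k) < n, i.e. cuts[k] ≤ (n-j) - k - 1
theorem pvIns2_eq (cuts : List Int) : ∀ (j n : Int), pvIns2 cuts j n = pvInsCut cuts (n - j) := by
  induction cuts with
  | nil => intro j n; simp [pvIns2, pvInsCut]
  | cons d ds ih =>
    intro j n
    rw [pvIns2, pvInsCut]
    by_cases h : d + j < n
    · rw [if_pos h, if_pos (by omega), ih (j + 1) n, show n - (j + 1) = n - j - 1 from by ring]
    · rw [if_neg h, if_neg (by omega)]

theorem pv_fold_eq (bits : List Int) : ∀ (cuts : List Int),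
    bits.foldl (fun cuts n => pvIns2 cuts 0 n) cuts
      = bits.foldl (fun cuts n => pvInsCut cuts n) cuts := by
  induction bits with
  | nil => intro cuts; rfl
  | cons n bits ih =>
    intro cuts
    rw [List.foldl_cons, List.foldl_cons, pvIns2_eq, show n - 0 = n from by ring, ih]

theorem pv_B_inv (cs : List Int) : ∀ (acc : Int) (shift : Nat) (prev h : Int),
    List.Pairwise (· ≤ ·) cs → (∀ c ∈ cs, prev ≤ c) →
    (let st := cs.foldl (fun (st : Int × Nat × Int × Int) c =>
      let w := c - st.2.2.1
      (st.1 + (PySem.Int.band st.2.2.2 ((1 <<< w.toNat) - 1)) <<< st.2.1,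
       st.2.1 + (w.toNat + 1),
       c,
       st.2.2.2 >>> w.toNat)) (acc, shift, prev, h)
     st.1 + (st.2.2.2 <<< st.2.1)) =
    acc + pvR h (cs.map fun c => c - prev) * 2 ^ shift := by
  induction cs with
  | nil => intro acc shift prev h _ _; simp [pvR_nil, Int.shiftLeft_eq]
  | cons c cs ih =>
    intro acc shift prev h hp hge
    have hcp : prev ≤ c := hge c (by simp)
    simp only [List.foldl_cons]
    rw [ih _ _ _ _ (List.pairwise_cons.mp hp).2
      (fun x hx => List.rel_of_pairwise_cons hp hx)]
    rw [pv_band_mask', Int.shiftLeft_eq, Int.shiftRight_eq_div_pow]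
    rw [List.map_cons, pvR_cons, List.map_map,
      show ((fun x => x - (c - prev)) ∘ fun x => x - prev) = fun x => x - c from
        funext (fun x => by simp only [Function.comp_apply]; ring)]
    rw [pow_add]
    push_cast
    ring

theorem pv_cuts_good (bits : List Int) : ∀ (cuts : List Int),
    List.Pairwise (· ≤ ·) cuts → (∀ c ∈ cuts, 0 ≤ c) → (∀ b ∈ bits, 0 ≤ b) →
    List.Pairwise (· ≤ ·) (bits.foldl (fun cuts n => pvInsCut cuts n) cuts) ∧
    (∀ c ∈ bits.foldl (fun cuts n => pvInsCut cuts n) cuts, 0 ≤ c) := by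
  induction bits with
  | nil => intro cuts hp hnn _; exact ⟨hp, hnn⟩
  | cons n bits ih =>
    intro cuts hp hnn hb
    have hn0 : (0:Int) ≤ n := hb n (by simp)
    rw [List.foldl_cons]
    exact ih (pvInsCut cuts n) (pv_ins_pairwise cuts n hp)
      (pv_ins_lb cuts n 0 hnn hn0) (fun b hbb => hb b (by simp [hbb]))

theorem pv_B_eq (l : Int) (bits : List Int) (hb : ∀ b ∈ bits, 0 ≤ b) :
    splite_at_alt l bits = pvR l (bits.foldl (fun cuts n => pvInsCut cuts n) []) := by
  obtain ⟨hp, hnn⟩ := pv_cuts_good bits [] (by simp) (by simp) hb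
  have hinv := pv_B_inv (bits.foldl (fun cuts n => pvInsCut cuts n) []) 0 0 0 l hp hnn
  have hmap : ((bits.foldl (fun cuts n => pvInsCut cuts n) []).map fun c => c - (0:Int))
      = bits.foldl (fun cuts n => pvInsCut cuts n) [] := by simp
  rw [hmap] at hinv
  simpa [splite_at_alt, pv_fold_eq] using hinv

theorem pv_main (l : Int) (bits : List Int) (hb : ∀ b ∈ bits, 0 ≤ b) :
    splite_at l bits = splite_at_alt l bits := by
  rw [pv_A_eq l bits hb, pv_B_eq l bits hb]

-- ===== VERDICT (by name: the statement is the Claim_ definition above) =====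
theorem splite_at_spec : Claim_equal_splite_at := by
  intro l bits _ hpre
  unfold Pre_splite_at at hpre
  unfold Spec_splite_at
  exact pv_main l bits hpre
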